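-- pv_equiv track=rewrite | github.com/mevljas/Programming-1 | Homework/Rim/Rim.py | razlika
-- ===== SOURCE A (Python) =====
-- def brez(s, x):
--     if not s:
--         return []
--     s2 = brez(s[1:], x)
--     if s[0] != x:
--         s2 = [s[0]] + s2
--     return s2
--
-- def razlika(s, t):
--     if not t:
--         return s
--     s = razlika(s, t[1:])
--     if t[0] in s:
--         s = brez(s, t[0])
--     else:
--         s.append(t[0])
--     return s
-- ===== SOURCE B (Python) =====
-- # One-pass re-implementation: walk t back-to-front once, keeping a membership set,
-- # a per-value removal-version dict and a lazy tail of appended items; O(|s|+|t|)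
-- # instead of A's O(|s|*|t|). Return value only: A sometimes mutates s in place, B never does.
-- def razlika(s, t):
--     present = set(s)
--     ver = {}          # ver[x] = how many times x has been purged so far
--     tail = []         # appended items, tagged with the version at append time
--     for x in reversed(t):
--         if x in present:
--             present.discard(x)
--             ver[x] = ver.get(x, 0) + 1
--         else:
--             present.add(x)
--             tail.append((x, ver.get(x, 0)))
--     return [x for x in s if ver.get(x, 0) == 0] + [x for (x, v) in tail if ver.get(x, 0) == v]
-- ===== Notes on version B (the rewrite author's own statement) =====
-- stated objective: faster
-- what changed: A's recursion rescans and rebuilds the whole list for every element of t (membership test plus brez/append); B makes one back-to-front pass over t maintaining a hash set, a per-value purge-version dict and a lazy tail, then reconstructs the result in one pass over s and the tail.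
import Mathlib
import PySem

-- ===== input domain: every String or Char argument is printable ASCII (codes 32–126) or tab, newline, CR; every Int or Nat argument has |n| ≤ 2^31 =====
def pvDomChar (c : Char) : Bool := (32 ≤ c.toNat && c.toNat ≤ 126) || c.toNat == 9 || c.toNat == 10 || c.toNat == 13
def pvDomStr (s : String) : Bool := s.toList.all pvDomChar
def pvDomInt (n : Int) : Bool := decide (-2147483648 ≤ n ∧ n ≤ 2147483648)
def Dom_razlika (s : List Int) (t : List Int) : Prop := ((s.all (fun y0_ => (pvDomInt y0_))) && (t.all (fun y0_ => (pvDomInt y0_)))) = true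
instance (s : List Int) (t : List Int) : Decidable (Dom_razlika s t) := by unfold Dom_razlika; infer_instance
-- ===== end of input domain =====

-- B replaces A's quadratic recursion (scan + rebuild of s for every element of t) by one back-to-front
-- pass over t with a membership set, a per-value purge-version dict and a lazily filtered tail (faster,
-- asymptotic). Return value only: A sometimes appends to the caller's list s in place, B never mutates.

-- ===== PORT A =====
def brez (s : List Int) (x : Int) : List Int :=
  match s with
  | [] => []
  | a :: rest =>
    let s2 := brez rest x
    if a ≠ x then a :: s2 else s2

def razlika (s : List Int) (t : List Int) : List Int :=
  match t with
  | [] => s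
  | x :: rest =>
    let s1 := razlika s rest
    if x ∈ s1 then brez s1 x else s1 ++ [x]

-- ===== PORT B =====
-- loop body of Source B's 'for x in reversed(t)': state = (present, ver, tail)
def altStep (st : PySem.Set Int × PySem.Dict Int Int × List (Int × Int)) (x : Int) :
    PySem.Set Int × PySem.Dict Int Int × List (Int × Int) :=
  if PySem.Set.contains st.1 x then
    (PySem.Set.discard st.1 x, PySem.Dict.insert st.2.1 x (PySem.Dict.getD st.2.1 x 0 + 1), st.2.2)
  else
    (PySem.Set.add st.1 x, st.2.1, st.2.2 ++ [(x, PySem.Dict.getD st.2.1 x 0)])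

def razlika_alt (s : List Int) (t : List Int) : List Int :=
  let st := t.reverse.foldl altStep (PySem.Set.ofList s, PySem.Dict.empty, ([] : List (Int × Int)))
  (s.filter (fun y => PySem.Dict.getD st.2.1 y 0 == 0)) ++
    ((st.2.2.filter (fun p => PySem.Dict.getD st.2.1 p.1 0 == p.2)).map (fun p => p.1))

-- ===== PRECONDITION & SPEC =====
def Spec_razlika (s : List Int) (t : List Int) (out : List Int) : Prop := out = razlika_alt s t
instance (s : List Int) (t : List Int) (out : List Int) : Decidable (Spec_razlika s t out) := by unfold Spec_razlika; infer_instance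

-- ===== CLAIM (what is proved, stated in full; the proofs are below) =====
def Claim_equal_razlika : Prop := ∀ (s : List Int) (t : List Int), Dom_razlika s t → Spec_razlika s t (razlika s t)

-- ===== LEMMAS AND PROOFS =====

-- the fold state B reaches after consuming t (back to front)
def stateOf (s : List Int) (t : List Int) :
    PySem.Set Int × PySem.Dict Int Int × List (Int × Int) :=
  t.reverse.foldl altStep (PySem.Set.ofList s, PySem.Dict.empty, ([] : List (Int × Int)))

-- B's final read-out of a state
def dec (s : List Int) (st : PySem.Set Int × PySem.Dict Int Int × List (Int × Int)) : List Int :=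
  (s.filter (fun y => PySem.Dict.getD st.2.1 y 0 == 0)) ++
    ((st.2.2.filter (fun p => PySem.Dict.getD st.2.1 p.1 0 == p.2)).map (fun p => p.1))

theorem razlika_alt_eq (s t : List Int) : razlika_alt s t = dec s (stateOf s t) := rfl

theorem stateOf_cons (s : List Int) (x : Int) (rest : List Int) :
    stateOf s (x :: rest) = altStep (stateOf s rest) x := by
  simp [stateOf, List.reverse_cons, List.foldl_append]

theorem brez_eq_filter (s : List Int) (x : Int) :
    brez s x = s.filter (fun a => !(a == x)) := by
  induction s with
  | nil => rfl
  | cons a rest ih =>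
    simp only [brez, ih, List.filter_cons]
    by_cases h : a = x <;> simp [h]

theorem razlika_invariant (s t : List Int) :
    dec s (stateOf s t) = razlika s t
    ∧ (∀ y, PySem.Set.contains (stateOf s t).1 y = true ↔ y ∈ razlika s t)
    ∧ (∀ p ∈ (stateOf s t).2.2, p.2 ≤ PySem.Dict.getD (stateOf s t).2.1 p.1 0)
    ∧ (∀ y, 0 ≤ PySem.Dict.getD (stateOf s t).2.1 y 0) := by
  induction t with
  | nil =>
    refine ⟨?_, ?_, ?_, ?_⟩
    · simp [stateOf, dec, razlika, PySem.Dict.getD_empty]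
    · intro y
      simp [stateOf, razlika, PySem.Set.contains_eq_listContains, PySem.Set.mem_ofList]
    · intro p hp; simp [stateOf] at hp
    · intro y; simp [stateOf, PySem.Dict.getD_empty]
  | cons x rest ih =>
    obtain ⟨hdec, hmem, htail, hpos⟩ := ih
    by_cases hc : PySem.Set.contains (stateOf s rest).1 x = true
    · -- x is present: purge branch
      have hxL : x ∈ razlika s rest := (hmem x).1 hc
      have hstep : stateOf s (x :: rest) =
          (PySem.Set.discard (stateOf s rest).1 x,
           PySem.Dict.insert (stateOf s rest).2.1 x
             (PySem.Dict.getD (stateOf s rest).2.1 x 0 + 1),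
           (stateOf s rest).2.2) := by
        rw [stateOf_cons]; unfold altStep; rw [if_pos hc]
      refine ⟨?_, ?_, ?_, ?_⟩
      · rw [hstep]
        have hA : razlika s (x :: rest) = brez (razlika s rest) x := by
          simp [razlika, hxL]
        rw [hA, brez_eq_filter, ← hdec]
        unfold dec
        rw [List.filter_append]
        congr 1
        · rw [List.filter_congr (l := s)
            (q := fun y => (!(y == x)) && (PySem.Dict.getD (stateOf s rest).2.1 y 0 == 0))
            (by
              intro y _
              by_cases hyx : y = x
              · rw [hyx]
                have h0 := hpos x
                have hne : (stateOf s rest).2.1.getD x 0 + 1 ≠ 0 := by omega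
                simp [PySem.Dict.getD_insert_self, hne]
              · simp [PySem.Dict.getD_insert, hyx])]
          rw [← List.filter_filter]
        · rw [List.filter_congr (l := (stateOf s rest).2.2)
            (q := fun p => (!(p.1 == x)) && (PySem.Dict.getD (stateOf s rest).2.1 p.1 0 == p.2))
            (by
              intro p hp
              by_cases hyx : p.1 = x
              · have hle := htail p hp
                have h0 := hpos p.1
                rw [hyx] at hle h0
                have hne : (stateOf s rest).2.1.getD x 0 + 1 ≠ p.2 := by omega
                simp [hyx, PySem.Dict.getD_insert_self, hne]
              · simp [PySem.Dict.getD_insert, hyx])]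
          rw [← List.filter_filter, List.filter_map]
          rfl
      · intro y
        rw [hstep]
        have hA : razlika s (x :: rest) = brez (razlika s rest) x := by
          simp [razlika, hxL]
        rw [hA, brez_eq_filter]
        simp only [PySem.Set.contains_eq_listContains, List.contains_eq_mem,
          PySem.Set.mem_discard, List.mem_filter, decide_eq_true_eq] at *
        constructor
        · rintro ⟨hy, hne⟩
          exact ⟨(hmem y).1 (by simpa using hy), by simpa using hne⟩
        · rintro ⟨hy, hne⟩
          exact ⟨by simpa using (hmem y).2 hy, by simpa using hne⟩
      · intro p hp
        rw [hstep] at hp ⊢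
        simp only at hp ⊢
        have hle := htail p hp
        by_cases hyx : p.1 = x
        · rw [hyx] at hle ⊢
          simp [PySem.Dict.getD_insert_self]
          omega
        · simp [PySem.Dict.getD_insert, hyx]
          exact hle
      · intro y
        rw [hstep]
        by_cases hyx : y = x
        · rw [hyx]
          have h0 := hpos x
          simp [PySem.Dict.getD_insert_self]
          omega
        · simp [PySem.Dict.getD_insert, hyx]
          exact hpos y
    · -- x is absent: append branch
      have hxL : x ∉ razlika s rest := fun h => hc ((hmem x).2 h)
      have hstep : stateOf s (x :: rest) =
          (PySem.Set.add (stateOf s rest).1 x,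
           (stateOf s rest).2.1,
           (stateOf s rest).2.2 ++ [(x, PySem.Dict.getD (stateOf s rest).2.1 x 0)]) := by
        rw [stateOf_cons]; unfold altStep; rw [if_neg hc]
      have hA : razlika s (x :: rest) = razlika s rest ++ [x] := by
        simp [razlika, hxL]
      refine ⟨?_, ?_, ?_, ?_⟩
      · rw [hstep, hA, ← hdec]
        unfold dec
        simp only [List.filter_append, List.map_append, List.filter_cons, List.filter_nil]
        simp [List.append_assoc]
      · intro y
        rw [hstep, hA]
        simp only [PySem.Set.contains_eq_listContains, List.contains_eq_mem,
          PySem.Set.mem_add, List.mem_append, List.mem_singleton, decide_eq_true_eq] at *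
        constructor
        · rintro (hy | hy)
          · exact Or.inl ((hmem y).1 (by simpa using hy))
          · exact Or.inr hy
        · rintro (hy | hy)
          · exact Or.inl (by simpa using (hmem y).2 hy)
          · exact Or.inr hy
      · intro p hp
        rw [hstep] at hp ⊢
        simp only [List.mem_append, List.mem_singleton] at hp
        rcases hp with hp | hp
        · exact htail p hp
        · subst hp; simp
      · intro y
        rw [hstep]
        exact hpos y

-- ===== VERDICT (by name: the statement is the Claim_ definition above) =====
theorem razlika_spec : Claim_equal_razlika := by
  intro s t _
  unfold Spec_razlika
  rw [razlika_alt_eq]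
  exact ((razlika_invariant s t).1).symm
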